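-- pv_equiv track=rewrite | github.com/openvinotoolkit/datumaro | datumaro/components/visualizer.py | _infer_grid_size
-- ===== SOURCE A (Python) =====
-- import math
-- from typing import Iterable, List, Optional, Tuple, Union
--
-- def _infer_grid_size(length: int, grid_size: Tuple[Optional[int], Optional[int]]):
--     nrows, ncols = grid_size
--
--     if nrows is None and ncols is None:
--         nrows = ncols = int(math.sqrt(length))
--
--         while nrows * ncols < length:
--             nrows += 1
--     elif nrows is None and ncols > 0:
--         nrows = int(length / ncols)
--
--         while nrows * ncols < length:
--             nrows += 1
--     elif nrows > 0 and ncols is None: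
--         ncols = int(length / nrows)
--
--         while nrows * ncols < length:
--             ncols += 1
--
--     assert nrows > 0, "nrows should be a positive integer."
--     assert ncols > 0, "ncols should be a positive integer."
--     assert length <= nrows * ncols, "The number of ids should less then or equal to nrows * ncols."
--
--     return nrows, ncols
-- ===== SOURCE B (Python) =====
-- import math
--
--
-- def _infer_grid_size(length, grid_size):
--     nrows, ncols = grid_size
--
--     if nrows is None:
--         if ncols is None:
--             ncols = int(math.sqrt(length))
--         nrows = (length + ncols - 1) // ncols
--     elif ncols is None:
--         ncols = (length + nrows - 1) // nrows
--
--     assert nrows > 0, "nrows should be a positive integer."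
--     assert ncols > 0, "ncols should be a positive integer."
--     assert length <= nrows * ncols, "The number of ids should less then or equal to nrows * ncols."
--
--     return nrows, ncols
-- ===== Notes on version B (the rewrite author's own statement) =====
-- stated objective: simpler
-- what changed: The three truncate-then-increment while-loop branches are collapsed into one nested branch that seeds the missing dimension (sqrt only when both are missing) and fills the other with a single closed-form ceiling division (length + d - 1) // d.
import Mathlib
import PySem

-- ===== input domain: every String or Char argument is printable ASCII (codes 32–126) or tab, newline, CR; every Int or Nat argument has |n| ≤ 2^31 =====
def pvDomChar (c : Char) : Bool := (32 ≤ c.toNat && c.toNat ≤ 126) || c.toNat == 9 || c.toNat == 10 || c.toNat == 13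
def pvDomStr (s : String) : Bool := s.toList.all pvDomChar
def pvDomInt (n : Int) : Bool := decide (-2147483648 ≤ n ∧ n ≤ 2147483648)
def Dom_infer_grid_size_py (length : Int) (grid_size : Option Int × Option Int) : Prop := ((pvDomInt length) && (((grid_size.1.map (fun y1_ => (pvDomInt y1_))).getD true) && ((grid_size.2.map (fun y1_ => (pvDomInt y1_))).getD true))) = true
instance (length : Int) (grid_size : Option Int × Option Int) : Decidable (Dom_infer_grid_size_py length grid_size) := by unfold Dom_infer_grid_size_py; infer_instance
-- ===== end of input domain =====

-- B collapses the three truncate-then-increment while-loop branches into one nested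
-- branch using a closed-form ceiling division (length + d - 1) // d; objective: simpler.


-- ===== PORT A =====
-- the `while n * d < length: n += 1` loop; fuel only makes it total (it never runs out
-- inside Pre_, see bumpA_eq below)
def bumpA (length d : Int) : Int → Nat → Int
  | n, 0 => n
  | n, fuel+1 => if n * d < length then bumpA length d (n+1) fuel else n

-- int(math.sqrt length): exact for 0 ≤ length ≤ 2^31 (correctly rounded double sqrt)
def pySqrtInt (length : Int) : Int := (Nat.sqrt length.toNat : Int)

def infer_grid_size_py (length : Int) (grid_size : Option Int × Option Int) : Int × Int :=
  match grid_size with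
  | (none, none) =>
      let s := pySqrtInt length
      (bumpA length s s (length.toNat + 1), s)
  | (none, some c) =>
      if c > 0 then
        -- int(length / c): truncating division (exact on the domain)
        (bumpA length c (Int.tdiv length c) (length.toNat + 1), c)
      else (0, 0)          -- A raises (TypeError / assert) here: outside Pre_
  | (some r, none) =>
      if r > 0 then
        (r, bumpA length r (Int.tdiv length r) (length.toNat + 1))
      else (0, 0)          -- A raises here: outside Pre_
  | (some r, some c) => (r, c)   -- asserts checked by Pre_

-- ===== PORT B =====
-- (length + d - 1) // d : Python floor division
def coverDim (length d : Int) : Int := Int.fdiv (length + d - 1) d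

def infer_grid_size_py_alt (length : Int) (grid_size : Option Int × Option Int) : Int × Int :=
  match grid_size.1 with
  | none =>
      let c := grid_size.2.getD (pySqrtInt length)
      (coverDim length c, c)
  | some r => (r, grid_size.2.getD (coverDim length r))

-- ===== PRECONDITION & SPEC =====
-- exactly the inputs on which the Python A returns: each branch needs a positive seed
-- dimension and length ≥ 1 (length ≤ 0 trips an assert or math.sqrt's ValueError);
-- with both dimensions given, the three asserts must hold.
def Pre_infer_grid_size_py (length : Int) (grid_size : Option Int × Option Int) : Prop :=
  match grid_size with
  | (none, none) => 1 ≤ length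
  | (none, some c) => 0 < c ∧ 1 ≤ length
  | (some r, none) => 0 < r ∧ 1 ≤ length
  | (some r, some c) => 0 < r ∧ 0 < c ∧ length ≤ r * c

instance (length : Int) (grid_size : Option Int × Option Int) : Decidable (Pre_infer_grid_size_py length grid_size) := by
  unfold Pre_infer_grid_size_py
  rcases grid_size with ⟨_ | r, _ | c⟩ <;> infer_instance

def pvWitness_infer_grid_size_py : Int × (Option Int × Option Int) := (10, (none, none))

def Spec_infer_grid_size_py (length : Int) (grid_size : Option Int × Option Int) (out : Int × Int) : Prop := out = infer_grid_size_py_alt length grid_size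
instance (length : Int) (grid_size : Option Int × Option Int) (out : Int × Int) : Decidable (Spec_infer_grid_size_py length grid_size out) := by unfold Spec_infer_grid_size_py; infer_instance

-- ===== CLAIM (what is proved, stated in full; the proofs are below) =====
def Claim_equal_infer_grid_size_py : Prop := ∀ (length : Int) (grid_size : Option Int × Option Int), Dom_infer_grid_size_py length grid_size → Pre_infer_grid_size_py length grid_size → Spec_infer_grid_size_py length grid_size (infer_grid_size_py length grid_size)

-- ===== LEMMAS AND PROOFS =====

-- characterisation of the ceiling division: q*d covers length, (q-1)*d does not
lemma coverDim_spec (length d : Int) (hd : 0 < d) :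
    length ≤ coverDim length d * d ∧ (coverDim length d - 1) * d < length := by
  unfold coverDim
  have hfe : Int.fdiv (length + d - 1) d = (length + d - 1) / d := by
    rw [Int.fdiv_eq_ediv]; simp [le_of_lt hd]
  have h1 := Int.mul_ediv_add_emod (length + d - 1) d
  have h2 := Int.emod_nonneg (length + d - 1) (ne_of_gt hd)
  have h3 := Int.emod_lt_of_pos (length + d - 1) hd
  rw [hfe]
  constructor <;> nlinarith [h1, h2, h3]

-- the increment loop reaches exactly the least n ≥ n0 with length ≤ n*d
lemma bumpA_eq (length d : Int) (q : Int) (hcov : length ≤ q * d)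
    (hmin : ∀ m : Int, m < q → m * d < length) :
    ∀ (fuel : Nat) (n : Int), n ≤ q → (q - n).toNat ≤ fuel →
      bumpA length d n fuel = q := by
  intro fuel
  induction fuel with
  | zero =>
      intro n hn hf
      have : n = q := by omega
      simp [bumpA, this]
  | succ k ih =>
      intro n hn hf
      unfold bumpA
      split
      · rename_i hlt
        have hnq : n < q := by
          rcases lt_or_eq_of_le hn with h | h
          · exact h
          · subst h; omega
        exact ih (n+1) (by omega) (by omega)
      · rename_i hge
        have : ¬ n < q := fun h => absurd (hmin n h) hge
        omega

lemma bumpA_is_cover (length d n0 : Int) (hd : 0 < d) (hl : 1 ≤ length)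
    (hn0 : n0 * d ≤ length) (hn0nn : 0 ≤ n0) :
    bumpA length d n0 (length.toNat + 1) = coverDim length d := by
  obtain ⟨hcov, hlt⟩ := coverDim_spec length d hd
  set q := coverDim length d with hq
  have hmin : ∀ m : Int, m < q → m * d < length := by
    intro m hm
    have : m * d ≤ (q - 1) * d := by nlinarith
    omega
  have hn0q : n0 ≤ q := by
    by_contra h
    have h2 : (q + 1) * d ≤ n0 * d :=
      mul_le_mul_of_nonneg_right (by omega) (le_of_lt hd)
    nlinarith
  have hq1 : 1 ≤ q := by
    by_contra h
    nlinarith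
  have hqle : q ≤ length := by
    have h2 : (q - 1) * 1 ≤ (q - 1) * d :=
      mul_le_mul_of_nonneg_left (by omega) (by omega)
    nlinarith
  exact bumpA_eq length d q hcov hmin (length.toNat + 1) n0 hn0q (by omega)

lemma tdiv_le (length d : Int) (hd : 0 < d) (hl : 0 ≤ length) :
    Int.tdiv length d * d ≤ length := by
  rw [Int.tdiv_eq_ediv_of_nonneg hl]
  have h1 := Int.mul_ediv_add_emod length d
  have h2 := Int.emod_nonneg length (ne_of_gt hd)
  nlinarith

lemma tdiv_nonneg' (length d : Int) (hd : 0 < d) (hl : 0 ≤ length) :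
    0 ≤ Int.tdiv length d :=
  Int.tdiv_nonneg hl (le_of_lt hd)

-- ===== VERDICT (by name: the statement is the Claim_ definition above) =====
theorem infer_grid_size_py_spec : Claim_equal_infer_grid_size_py := by
  intro length grid_size _ hpre
  unfold Spec_infer_grid_size_py
  rcases grid_size with ⟨_ | r, _ | c⟩
  · -- (none, none)
    unfold Pre_infer_grid_size_py at hpre
    simp only [infer_grid_size_py, infer_grid_size_py_alt, Option.getD]
    have hs : 1 ≤ pySqrtInt length := by
      unfold pySqrtInt
      have h1 : 1 ≤ length.toNat := by omega
      have := Nat.sqrt_pos.mpr h1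
      omega
    have hsq : pySqrtInt length * pySqrtInt length ≤ length := by
      unfold pySqrtInt
      have h : Nat.sqrt length.toNat * Nat.sqrt length.toNat ≤ length.toNat := by
        have := Nat.sqrt_le' length.toNat
        simpa [pow_two] using this
      have hcast : (length.toNat : Int) = length := by omega
      have h2 : ((Nat.sqrt length.toNat : Nat) : Int) * ((Nat.sqrt length.toNat : Nat) : Int)
          ≤ ((length.toNat : Nat) : Int) := by exact_mod_cast h
      rw [hcast] at h2
      exact h2
    rw [bumpA_is_cover length (pySqrtInt length) (pySqrtInt length) (by omega) hpre hsq (by omega)]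
  · -- (none, some c)
    obtain ⟨hc, hl⟩ := hpre
    simp only [infer_grid_size_py, infer_grid_size_py_alt, Option.getD, if_pos hc]
    rw [bumpA_is_cover length c (Int.tdiv length c) hc hl
        (tdiv_le length c hc (by omega)) (tdiv_nonneg' length c hc (by omega))]
  · -- (some r, none)
    obtain ⟨hr, hl⟩ := hpre
    simp only [infer_grid_size_py, infer_grid_size_py_alt, Option.getD, if_pos hr]
    rw [bumpA_is_cover length r (Int.tdiv length r) hr hl
        (tdiv_le length r hr (by omega)) (tdiv_nonneg' length r hr (by omega))]
  · -- (some r, some c)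
    rfl
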